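-- pv_equiv track=rewrite | github.com/ubs121/alg | numbers/number_of_ones.py | ones
-- ===== SOURCE A (Python) =====
-- import math
--
-- def ones(d: int, p: int) -> int:
--     if d==0:
--         return 0
--     if p==0:
--         return 1  # d>0
--
--     # 1s in up to d*10^n numbers = sum(k*C(n,k)*pow(9,n-k)), where k=[1,n], C(n,k) - combinations
--     s=sum([k*math.comb(p,k)*pow(9,p-k) for k in range(1,p+1)])
--     if d==1:
--         return s+1
--     return d*s+pow(10, p)
-- ===== SOURCE B (Python) =====
-- def ones(d: int, p: int) -> int:
--     # Iterate the recurrence t -> 10*t + 10^n (t = count of 1s in [0,10^n)),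
--     # instead of A's binomial sum; one pass of p cheap steps, no comb/pow calls.
--     if d == 0:
--         return 0
--     if p == 0:
--         return 1
--     t, tenp = 0, 1
--     for _ in range(p):
--         t = 10 * t + tenp
--         tenp *= 10
--     if d == 1:
--         return t + 1
--     return d * t + tenp
-- ===== Notes on version B (the rewrite author's own statement) =====
-- stated objective: faster
-- what changed: Replaces the binomial sum sum_{k=1..p} k*C(p,k)*9^(p-k) with a single loop iterating the recurrence t -> 10*t + 10^n (t = number of 1-digits in [0,10^n)), no comb or pow calls.
-- outside the precondition, e.g. on ones(2, -3): A returns 0.001, B returns 1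
import Mathlib
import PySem

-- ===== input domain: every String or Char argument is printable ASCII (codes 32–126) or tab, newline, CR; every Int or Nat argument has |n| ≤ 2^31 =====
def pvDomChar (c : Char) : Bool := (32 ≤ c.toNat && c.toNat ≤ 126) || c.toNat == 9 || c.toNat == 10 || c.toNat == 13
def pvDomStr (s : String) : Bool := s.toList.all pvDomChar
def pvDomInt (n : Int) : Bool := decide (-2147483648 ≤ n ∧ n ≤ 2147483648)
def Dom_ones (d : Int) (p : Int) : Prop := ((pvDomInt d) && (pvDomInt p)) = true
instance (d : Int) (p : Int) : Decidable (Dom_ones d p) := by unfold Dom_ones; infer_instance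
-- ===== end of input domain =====

-- B iterates the recurrence t -> 10*t + 10^n in one cheap loop instead of A's binomial
-- sum with comb/pow per term (timed measurably faster).


-- ===== PORT A =====
def ones (d : Int) (p : Int) : Int :=
  if d = 0 then 0
  else if p = 0 then 1
  else
    -- s = sum([k*math.comb(p,k)*pow(9,p-k) for k in range(1,p+1)])
    let s : Int :=
      ((PySem.List.pyRange 1 (p+1) 1).map
        (fun k => k * (Nat.choose p.toNat k.toNat : Int) * (9:Int)^(p-k).toNat)).sum
    if d = 1 then s + 1 else d * s + (10:Int)^p.toNat

-- ===== PORT B =====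
def ones_alt (d : Int) (p : Int) : Int :=
  if d = 0 then 0
  else if p = 0 then 1
  else
    -- t, tenp = 0, 1; for _ in range(p): t, tenp = 10*t + tenp, 10*tenp
    let st : Int × Int :=
      (PySem.List.pyRange 0 p 1).foldl (fun st _ => (10 * st.1 + st.2, 10 * st.2)) (0, 1)
    if d = 1 then st.1 + 1 else d * st.1 + st.2

-- ===== PRECONDITION & SPEC =====
-- Pre_ excludes p<0 with d∉{0,1}: A's pow(10,p) there yields a Python float, not an int.
def Pre_ones (d : Int) (p : Int) : Prop := 0 ≤ p ∨ d = 0 ∨ d = 1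
instance (d : Int) (p : Int) : Decidable (Pre_ones d p) := by unfold Pre_ones; infer_instance
def pvWitness_ones : Int × Int := (3, 2)

def Spec_ones (d : Int) (p : Int) (out : Int) : Prop := out = ones_alt d p
instance (d : Int) (p : Int) (out : Int) : Decidable (Spec_ones d p out) := by unfold Spec_ones; infer_instance

-- ===== CLAIM (what is proved, stated in full; the proofs are below) =====
def Claim_equal_ones : Prop := ∀ (d : Int) (p : Int), Dom_ones d p → Pre_ones d p → Spec_ones d p (ones d p)

-- ===== LEMMAS AND PROOFS =====

-- key binomial identity over ℕ: ∑_{j<m+1} (j+1)·C(m+1,j+1)·9^(m-j) = (m+1)·10^m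
lemma pv_nat_key (m : ℕ) :
    ∑ j ∈ Finset.range (m+1), (j+1) * Nat.choose (m+1) (j+1) * 9^(m - j) = (m+1) * 10^m := by
  have h1 : ∀ j, (j+1) * Nat.choose (m+1) (j+1) = (m+1) * Nat.choose m j := by
    intro j
    rw [mul_comm]
    exact (Nat.add_one_mul_choose_eq m j).symm
  calc ∑ j ∈ Finset.range (m+1), (j+1) * Nat.choose (m+1) (j+1) * 9^(m - j)
      = ∑ j ∈ Finset.range (m+1), (m+1) * (Nat.choose m j * 9^(m - j)) := by
        refine Finset.sum_congr rfl fun j _ => ?_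
        rw [h1 j, mul_assoc]
    _ = (m+1) * ∑ j ∈ Finset.range (m+1), Nat.choose m j * 9^(m - j) := by
        rw [Finset.mul_sum]
    _ = (m+1) * 10^m := by
        congr 1
        have := add_pow 1 9 m
        simp only [one_pow, one_mul] at this
        norm_num at this
        rw [this]
        exact Finset.sum_congr rfl fun j _ => mul_comm _ _

-- A's list sum equals p*10^(p-1), for p ≥ 1
lemma pv_sum_eq (p : Int) (hp : 1 ≤ p) :
    ((PySem.List.pyRange 1 (p+1) 1).map
      (fun k => k * (Nat.choose p.toNat k.toNat : Int) * (9:Int)^(p-k).toNat)).sum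
    = p * (10:Int)^(p-1).toNat := by
  obtain ⟨n, rfl⟩ : ∃ n : ℕ, p = (n:Int) := ⟨p.toNat, (Int.toNat_of_nonneg (by omega)).symm⟩
  have hn : 1 ≤ n := by exact_mod_cast hp
  rw [PySem.List.pyRange_one]
  have harg : ((n:Int) + 1 - 1).toNat = n := by omega
  rw [harg]
  have hmap : (List.range n).map
      ((fun k : Int => k * (Nat.choose (n:Int).toNat k.toNat : Int) * (9:Int)^(((n:Int))-k).toNat)
        ∘ fun j : ℕ => (1 : Int) + j)
      = (List.range n).map (fun j : ℕ => (((j+1) * Nat.choose n (j+1) * 9^(n - (j+1)) : ℕ) : Int)) := by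
    apply List.map_congr_left
    intro j hj
    have hjn : j < n := List.mem_range.mp hj
    simp only [Function.comp]
    have h1 : ((1 : Int) + j).toNat = j + 1 := by omega
    have h2 : ((n:Int) - (1 + j)).toNat = n - (j+1) := by omega
    rw [h1, h2]
    simp only [Int.toNat_natCast]
    push_cast
    ring
  rw [List.map_map, hmap]
  obtain ⟨m, rfl⟩ : ∃ m, n = m + 1 := ⟨n - 1, by omega⟩
  simp only [Nat.succ_sub_succ]
  have hsum : ∀ N : ℕ, ((List.range N).map
        (fun j : ℕ => (((j+1) * Nat.choose (m+1) (j+1) * 9^(m - j) : ℕ) : Int))).sum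
      = ((∑ j ∈ Finset.range N, (j+1) * Nat.choose (m+1) (j+1) * 9^(m - j) : ℕ) : Int) := by
    intro N
    induction N with
    | zero => simp
    | succ k ih =>
      rw [List.range_succ, List.map_append, List.sum_append, Finset.sum_range_succ, ih]
      push_cast
      simp
  rw [hsum, pv_nat_key m]
  have h3 : (((m + 1 : ℕ) : Int) - 1).toNat = m := by omega
  rw [h3]
  push_cast
  ring

-- B's loop state after n iterations: (n·10^(n-1), 10^n)
lemma pv_loop_eq (n : ℕ) :
    (List.range n).foldl (fun (st : Int × Int) (_ : ℕ) => (10 * st.1 + st.2, 10 * st.2)) (0, 1)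
    = ((n : Int) * (10:Int)^(n-1), (10:Int)^n) := by
  induction n with
  | zero => simp
  | succ k ih =>
    rw [List.range_succ, List.foldl_append, ih]
    simp only [List.foldl_cons, List.foldl_nil]
    rcases Nat.eq_zero_or_pos k with hk | hk
    · subst hk; norm_num
    · have h1 : k - 1 + 1 = k := by omega
      have h2 : k + 1 - 1 = k := by omega
      have h3 : (10:Int)^k = 10 * (10:Int)^(k-1) := by
        rw [← pow_succ', h1]
      rw [Prod.mk.injEq]
      refine ⟨?_, by rw [pow_succ]; ring⟩
      rw [h2, h3]
      push_cast
      ring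

-- B's foldl over pyRange 0 p 1 (element ignored) equals the range-n foldl
lemma pv_loop_range (p : Int) (hp : 0 ≤ p) :
    (PySem.List.pyRange 0 p 1).foldl (fun (st : Int × Int) (_ : Int) => (10 * st.1 + st.2, 10 * st.2)) (0, 1)
    = (List.range p.toNat).foldl (fun (st : Int × Int) (_ : ℕ) => (10 * st.1 + st.2, 10 * st.2)) (0, 1) := by
  rw [PySem.List.pyRange_one]
  have : (p - 0).toNat = p.toNat := by omega
  rw [this, List.foldl_map]

-- ===== VERDICT (by name: the statement is the Claim_ definition above) =====
theorem ones_spec : Claim_equal_ones := by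
  intro d p _ hpre
  unfold Spec_ones ones ones_alt
  by_cases hd : d = 0
  · simp [hd]
  · by_cases hp : p = 0
    · simp [hd, hp]
    · simp only [hd, hp, if_false]
      by_cases hp1 : 1 ≤ p
      · rw [pv_sum_eq p hp1, pv_loop_range p (by omega), pv_loop_eq]
        have h1 : (p - 1).toNat = p.toNat - 1 := by omega
        have h2 : ((p.toNat : Int)) = p := Int.toNat_of_nonneg (by omega)
        rw [h1, h2]
      · -- p < 0, so Pre_ forces d = 1; both ranges are empty
        have hd1 : d = 1 := by rcases hpre with h | h | h <;> omega
        have hplt : p < 0 := by omega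
        have e1 : PySem.List.pyRange 1 (p+1) 1 = [] := by
          rw [PySem.List.pyRange_one]
          have h : (p + 1 - 1).toNat = 0 := by omega
          rw [h]
          rfl
        have e2 : PySem.List.pyRange 0 p 1 = [] := by
          rw [PySem.List.pyRange_one]
          have h : (p - 0).toNat = 0 := by omega
          rw [h]
          rfl
        rw [e1, e2]
        simp [hd1]
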